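-- pv_equiv track=rewrite | github.com/morecry/SSP | topic_test.py | get_topic_sessions
-- ===== SOURCE A (Python) =====
-- def get_topic_sessions(records):
--     sessions = {}
--     for item in records:
--         if item['topic_number'] not in sessions:
--             sessions[item['topic_number']] = item
--         elif sessions[item['topic_number']]['query_number'] < item['query_number']:
--             sessions[item['topic_number']] = item
--     return sessions
-- ===== SOURCE B (Python) =====
-- def _best(items):
--     best = items[0]
--     for x in items[1:]:
--         if best['query_number'] < x['query_number']:
--             best = x
--     return best
--
-- def get_topic_sessions(records):
--     groups = {}
--     for item in records:
--         groups.setdefault(item['topic_number'], []).append(item)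
--     return {topic: _best(items) for topic, items in groups.items()}
-- ===== Notes on version B (the rewrite author's own statement) =====
-- stated objective: alternative
-- what changed: B replaces A's single-pass running-maximum dict update with a two-phase decomposition: one pass grouping records by topic into lists, then a dict comprehension picking each group's first maximal record by query_number with a plain scan (same strict-< tie-break).
import Mathlib
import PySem

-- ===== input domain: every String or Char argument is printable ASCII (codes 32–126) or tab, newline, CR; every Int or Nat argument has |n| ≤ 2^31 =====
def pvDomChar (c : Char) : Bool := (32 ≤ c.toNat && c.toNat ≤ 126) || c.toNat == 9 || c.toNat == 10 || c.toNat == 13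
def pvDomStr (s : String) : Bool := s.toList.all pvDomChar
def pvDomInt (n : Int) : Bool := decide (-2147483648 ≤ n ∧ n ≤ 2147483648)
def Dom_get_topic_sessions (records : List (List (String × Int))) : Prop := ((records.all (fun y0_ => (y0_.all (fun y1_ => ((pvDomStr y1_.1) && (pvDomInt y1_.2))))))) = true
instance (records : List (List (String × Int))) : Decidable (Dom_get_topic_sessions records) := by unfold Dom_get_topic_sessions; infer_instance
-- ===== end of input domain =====

-- B regroups the records per topic first and then takes the per-group maximum, instead of A's
-- single-pass running-maximum dict; same cost, a different decomposition (return-value equivalence;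
-- neither program mutates its argument).

-- item[k] for an int-valued record, in total form: exact whenever k is present (guaranteed by Pre_).
def pvItemGet (item : List (String × Int)) (k : String) : Int :=
  (PySem.Dict.mk item).getD k 0

-- item['query_number'] (the value both programs compare records by)
def pvQk (item : List (String × Int)) : Int := pvItemGet item "query_number"

-- ===== PORT A =====
def get_topic_sessions (records : List (List (String × Int))) : List (Int × List (String × Int)) :=
  (records.foldl
    (fun (sessions : PySem.Dict Int (List (String × Int))) item =>
      let t := pvItemGet item "topic_number"
      if sessions.contains t = false then
        sessions.insert t item
      else if pvQk (sessions.getD t []) < pvQk item then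
        sessions.insert t item
      else
        sessions)
    PySem.Dict.empty).items

-- ===== PORT B =====
-- _best(items): items[0], then a scan over items[1:] keeping the first maximal record;
-- items[0] in total form (groups are always nonempty), items[1:] is PySem.List.slice
def pvBest (items : List (List (String × Int))) : List (String × Int) :=
  (PySem.List.slice items (some 1) none).foldl
    (fun best x => if pvQk best < pvQk x then x else best)
    (PySem.List.pyGetD items 0 [])

def get_topic_sessions_alt (records : List (List (String × Int))) : List (Int × List (String × Int)) :=
  let groups : PySem.Dict Int (List (List (String × Int))) :=
    records.foldl
      (fun g item => g.modify (pvItemGet item "topic_number") [] (· ++ [item]))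
      PySem.Dict.empty
  groups.items.map (fun p => (p.1, pvBest p.2))

-- ===== PRECONDITION & SPEC =====
-- Pre_ excludes exactly the inputs on which Python A raises KeyError: an item without the
-- 'topic_number' key, or an item of a repeated topic (its topic_number occurring in more than
-- one item) without the 'query_number' key; B raises on exactly the same inputs.
def Pre_get_topic_sessions (records : List (List (String × Int))) : Prop :=
  (records.all (fun item =>
    (PySem.Dict.mk item).contains "topic_number" &&
    (decide (records.countP (fun it2 =>
        (PySem.Dict.mk it2).getD "topic_number" 0
          == (PySem.Dict.mk item).getD "topic_number" 0) ≤ 1) ||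
     (PySem.Dict.mk item).contains "query_number"))) = true
instance (records : List (List (String × Int))) : Decidable (Pre_get_topic_sessions records) := by
  unfold Pre_get_topic_sessions; infer_instance

def pvWitness_get_topic_sessions : (List (List (String × Int))) :=
  [[("topic_number", 1), ("query_number", 2)], [("topic_number", 1), ("query_number", 5)]]

def Spec_get_topic_sessions (records : List (List (String × Int))) (out : List (Int × List (String × Int))) : Prop := out = get_topic_sessions_alt records
instance (records : List (List (String × Int))) (out : List (Int × List (String × Int))) : Decidable (Spec_get_topic_sessions records out) := by unfold Spec_get_topic_sessions; infer_instance

-- ===== CLAIM (what is proved, stated in full; the proofs are below) =====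
def Claim_equal_get_topic_sessions : Prop := ∀ (records : List (List (String × Int))), Dom_get_topic_sessions records → Pre_get_topic_sessions records → Spec_get_topic_sessions records (get_topic_sessions records)

-- ===== LEMMAS AND PROOFS =====

-- the value map that turns B's grouping dict entries into A's session entries
def pvPhi (p : Int × List (List (String × Int))) : Int × List (String × Int) :=
  (p.1, pvBest p.2)

-- B's scan keeps the FIRST maximal record: appending one element updates it by a strict '<' test.
lemma pvBest_append (l : List (List (String × Int))) (x : List (String × Int)) (hl : l ≠ []) :
    pvBest (l ++ [x]) = if pvQk (pvBest l) < pvQk x then x else pvBest l := by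
  obtain ⟨a, l', rfl⟩ := List.exists_cons_of_ne_nil hl
  unfold pvBest
  rw [PySem.List.slice_from_one, PySem.List.slice_from_one]
  simp only [List.cons_append, List.tail_cons, List.foldl_append, List.foldl_cons,
    List.foldl_nil, PySem.List.pyGetD_zero_cons]

lemma pvBest_singleton (x : List (String × Int)) : pvBest [x] = x := rfl

-- the core loop invariant: A's sessions dict is the pvPhi-image of B's grouping dict
lemma pv_loop (records : List (List (String × Int)))
    (g : PySem.Dict Int (List (List (String × Int))))
    (hnd : (g.items.map (·.1)).Nodup)
    (hne : ∀ p ∈ g.items, p.2 ≠ []) :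
    (records.foldl
      (fun (sessions : PySem.Dict Int (List (String × Int))) item =>
        let t := pvItemGet item "topic_number"
        if sessions.contains t = false then sessions.insert t item
        else if pvQk (sessions.getD t []) < pvQk item then sessions.insert t item
        else sessions)
      (PySem.Dict.mk (g.items.map pvPhi))).items
    = (records.foldl
        (fun g item => g.modify (pvItemGet item "topic_number") [] (· ++ [item]))
        g).items.map pvPhi := by
  induction records generalizing g with
  | nil => simp
  | cons item rest ih =>
    simp only [List.foldl_cons]
    set t := pvItemGet item "topic_number" with ht
    have hcont : (PySem.Dict.mk (g.items.map pvPhi)).contains t = g.contains t := by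
      simp only [PySem.Dict.contains, List.any_map]
      rfl
    by_cases hc : g.contains t = true
    · -- existing topic
      obtain ⟨l, hl⟩ : ∃ l, g.get? t = some l := by
        have h := PySem.Dict.contains_eq_isSome_get? (d := g) (k := t)
        rw [hc] at h
        exact Option.isSome_iff_exists.mp h.symm
      obtain ⟨⟨q1, q2⟩, hfind, hq2⟩ : ∃ q, g.items.find? (fun p => p.1 == t) = some q ∧ q.2 = l := by
        simp only [PySem.Dict.get?, Option.map_eq_some_iff] at hl
        obtain ⟨q, h1, h2⟩ := hl
        exact ⟨q, h1, h2⟩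
      have hq1 : q1 = t := by simpa using List.find?_some hfind
      simp only at hq2
      have hfind' : g.items.find? (fun p => p.1 == t) = some (t, l) := by
        rw [hfind, hq1, hq2]
      have hmem : (t, l) ∈ g.items := List.mem_of_find?_eq_some hfind'
      have hlne : l ≠ [] := hne _ hmem
      have hgd : g.getD t [] = l := by
        rw [PySem.Dict.getD_eq_get?_getD, hl]; rfl
      have hAget : (PySem.Dict.mk (g.items.map pvPhi)).getD t [] = pvBest l := by
        rw [PySem.Dict.getD_eq_get?_getD]
        simp only [PySem.Dict.get?, List.find?_map]
        have h3 : g.items.find? ((fun p => p.1 == t) ∘ pvPhi) = some (t, l) := hfind'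
        rw [h3]
        rfl
      -- key uniqueness: any member with key t has value l
      have huniq : ∀ p ∈ g.items, p.1 = t → p.2 = l := by
        rintro ⟨a, b⟩ hp hpt
        simp only at hpt ⊢
        subst hpt
        have h1 : g.get? t = some b := PySem.Dict.get?_of_mem_items g hp hnd
        rw [hl] at h1
        exact (Option.some_inj.mp h1).symm
      -- B's step
      have hmod : g.modify t [] (· ++ [item])
          = PySem.Dict.mk (g.items.map (fun p => if p.1 == t then (t, l ++ [item]) else p)) := by
        simp only [PySem.Dict.modify, hgd, PySem.Dict.insert, hc, if_true]
      have hcontA : (PySem.Dict.mk (g.items.map pvPhi)).contains t = true := by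
        rw [hcont]; exact hc
      rw [hcont, hc]
      simp only [Bool.true_eq_false, if_false, hAget]
      have hkeys' : ((g.items.map (fun p => if p.1 == t then (t, l ++ [item]) else p)).map (·.1)).Nodup := by
        have : (g.items.map (fun p => if p.1 == t then (t, l ++ [item]) else p)).map (·.1)
            = g.items.map (·.1) := by
          rw [List.map_map]
          apply List.map_congr_left
          intro p _
          by_cases hpt : p.1 = t
          · simp [hpt]
          · simp [hpt]
        rw [this]; exact hnd
      have hne' : ∀ p ∈ (g.items.map (fun p => if p.1 == t then (t, l ++ [item]) else p)), p.2 ≠ [] := by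
        intro p hp
        obtain ⟨p0, hp0, rfl⟩ := List.mem_map.mp hp
        by_cases hpt : p0.1 = t
        · rw [if_pos (by simpa using hpt)]
          simp
        · rw [if_neg (by simpa using hpt)]
          exact hne p0 hp0
      by_cases hlt : pvQk (pvBest l) < pvQk item
      · -- replace
        rw [if_pos hlt]
        have hinsA : (PySem.Dict.mk (g.items.map pvPhi)).insert t item
            = PySem.Dict.mk ((g.items.map (fun p => if p.1 == t then (t, l ++ [item]) else p)).map pvPhi) := by
          simp only [PySem.Dict.insert, hcontA, if_true, List.map_map]
          congr 1
          apply List.map_congr_left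
          intro p hp
          by_cases hpt : p.1 = t
          · have hpl : p.2 = l := huniq p hp hpt
            simp only [Function.comp, pvPhi, hpt, hpl, beq_self_eq_true, if_true]
            rw [pvBest_append l item hlne, if_pos hlt]
          · simp [Function.comp, pvPhi, hpt]
        rw [hinsA, hmod]
        exact ih _ hkeys' hne'
      · -- keep
        rw [if_neg hlt]
        have hsame : (g.items.map pvPhi)
            = (g.items.map (fun p => if p.1 == t then (t, l ++ [item]) else p)).map pvPhi := by
          rw [List.map_map]
          apply List.map_congr_left
          intro p hp
          by_cases hpt : p.1 = t
          · have hpl : p.2 = l := huniq p hp hpt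
            simp only [Function.comp, pvPhi, hpt, hpl, beq_self_eq_true, if_true]
            rw [pvBest_append l item hlne, if_neg hlt]
          · simp [Function.comp, pvPhi, hpt]
        rw [show (PySem.Dict.mk (g.items.map pvPhi))
              = PySem.Dict.mk ((g.items.map (fun p => if p.1 == t then (t, l ++ [item]) else p)).map pvPhi)
            from by rw [← hsame], hmod]
        exact ih _ hkeys' hne'
    · -- new topic
      have hcF : g.contains t = false := by simpa using hc
      have hnm : t ∉ g.items.map (·.1) := by
        intro hmemt
        obtain ⟨⟨a, b⟩, hp, hab⟩ := List.mem_map.mp hmemt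
        simp only at hab
        apply hc
        simp only [PySem.Dict.contains, List.any_eq_true]
        exact ⟨(a, b), hp, by simpa using hab⟩
      have hgd : g.getD t [] = [] :=
        PySem.Dict.getD_of_not_contains g [] hcF
      have hins :
          (PySem.Dict.mk (g.items.map pvPhi)).insert t item
            = PySem.Dict.mk ((g.items.map pvPhi) ++ [(t, item)]) := by
        simp [PySem.Dict.insert, hcont, hcF]
      have hmod :
          g.modify t [] (· ++ [item]) = PySem.Dict.mk (g.items ++ [(t, [item])]) := by
        simp [PySem.Dict.modify, hgd, PySem.Dict.insert, hcF]
      rw [hcont, hcF, if_pos rfl, hins, hmod]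
      have hnd' : ((g.items ++ [(t, [item])]).map (·.1)).Nodup := by
        rw [List.map_append]
        refine List.Nodup.append hnd (by simp) ?_
        intro a ha hb
        simp only [List.map_cons, List.map_nil, List.mem_singleton] at hb
        exact hnm (hb ▸ ha)
      have hne'' : ∀ p ∈ g.items ++ [(t, [item])], p.2 ≠ [] := by
        intro p hp
        rcases List.mem_append.mp hp with h | h
        · exact hne p h
        · simp only [List.mem_singleton] at h
          subst h
          simp
      have := ih (PySem.Dict.mk (g.items ++ [(t, [item])])) hnd' hne''
      simpa [pvPhi, List.map_append, pvBest_singleton] using this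

-- ===== VERDICT (by name: the statement is the Claim_ definition above) =====
theorem get_topic_sessions_spec : Claim_equal_get_topic_sessions := by
  intro records _ _
  unfold Spec_get_topic_sessions get_topic_sessions get_topic_sessions_alt
  have := pv_loop records PySem.Dict.empty (by simp [PySem.Dict.empty]) (by simp [PySem.Dict.empty])
  simpa [PySem.Dict.empty, pvPhi] using this
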